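-- pv_equiv track=rewrite | github.com/hyunse0/Algorithm | Python/SWEA/6190.py | is_danjo
-- ===== SOURCE A (Python) =====
-- def is_danjo(number):
--     temp = []
--
--     while number >= 10:
--         temp.append(number%10)
--         number //= 10
--
--     temp.append(number)
--
--     for i in range(len(temp)-1):
--         if temp[i] < temp[i+1]:
--             return False
--
--     return True
-- ===== SOURCE B (Python) =====
-- def is_danjo(number):
--     if number < 10:
--         return True
--     s = str(number)
--     return list(s) == sorted(s)
-- ===== Notes on version B (the rewrite author's own statement) =====
-- stated objective: simpler
-- what changed: Replaces A's LSB-first digit extraction into a list followed by an index-based adjacent-pair scan with a sort-then-compare check on the decimal string (list(s) == sorted(s)), guarded by the same trivial answer for number < 10.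
import Mathlib
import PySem

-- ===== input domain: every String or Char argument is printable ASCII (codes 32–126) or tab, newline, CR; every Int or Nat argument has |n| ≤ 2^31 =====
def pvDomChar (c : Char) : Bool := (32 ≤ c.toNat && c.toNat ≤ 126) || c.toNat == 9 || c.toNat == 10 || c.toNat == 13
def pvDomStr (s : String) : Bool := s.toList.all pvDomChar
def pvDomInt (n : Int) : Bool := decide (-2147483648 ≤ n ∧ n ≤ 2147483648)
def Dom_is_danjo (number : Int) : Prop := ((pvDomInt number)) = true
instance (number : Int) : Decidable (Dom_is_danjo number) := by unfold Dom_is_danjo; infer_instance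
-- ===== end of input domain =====

-- B replaces A's LSB-first digit extraction plus adjacent-pair index scan with a
-- sort-then-compare on the decimal string (objective: simpler).

-- ===== PORT A =====
-- the `while number >= 10` loop; terminates because number // 10 < number when 10 ≤ number
def isDanjoLoopA (number : Int) (temp : List Int) : List Int :=
  if _h : 10 ≤ number then
    isDanjoLoopA (PySem.Int.floordiv number 10) (temp ++ [PySem.Int.mod number 10])
  else temp ++ [number]
termination_by number.toNat
decreasing_by
  rw [PySem.Int.floordiv_eq_ediv_of_pos (by omega : (0:Int) < 10)]
  omega

def is_danjo (number : Int) : Bool :=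
  let temp := isDanjoLoopA number []
  -- the `for i in range(len(temp)-1)` scan with early `return False`;
  -- both indices i, i+1 are always in range, so pyGetD's default is never used
  (PySem.List.pyRange 0 (PySem.List.len temp - 1)).all
    (fun i => !decide (PySem.List.pyGetD temp i 0 < PySem.List.pyGetD temp (i + 1) 0))

-- ===== PORT B =====
def is_danjo_alt (number : Int) : Bool :=
  if number < 10 then true
  else
    let s := PySem.Int.toStr number
    s.toList == PySem.List.sorted s.toList (fun c => c)

-- ===== PRECONDITION & SPEC =====
def Spec_is_danjo (number : Int) (out : Bool) : Prop := out = is_danjo_alt number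
instance (number : Int) (out : Bool) : Decidable (Spec_is_danjo number out) := by unfold Spec_is_danjo; infer_instance

-- ===== CLAIM (what is proved, stated in full; the proofs are below) =====
def Claim_equal_is_danjo : Prop := ∀ (number : Int), Dom_is_danjo number → Spec_is_danjo number (is_danjo number)

-- ===== LEMMAS AND PROOFS =====

-- the digit list A's while-loop appends (LSB first), as a standalone recursion
def digitsLSB (n : Int) : List Int :=
  if _h : 10 ≤ n then PySem.Int.mod n 10 :: digitsLSB (PySem.Int.floordiv n 10) else [n]
termination_by n.toNat
decreasing_by
  rw [PySem.Int.floordiv_eq_ediv_of_pos (by omega : (0:Int) < 10)]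
  omega

-- MSB-first decimal digit characters of a natural number
def msbChars (m : Nat) : List Char :=
  if _h : m < 10 then [Nat.digitChar m]
  else msbChars (m / 10) ++ [Nat.digitChar (m % 10)]
termination_by m
decreasing_by omega

lemma loopA_eq (n : Int) (temp : List Int) : isDanjoLoopA n temp = temp ++ digitsLSB n := by
  fun_induction isDanjoLoopA n temp with
  | case1 n temp h ih =>
    rw [digitsLSB]
    simp only [h, dite_true, ih]
    simp
  | case2 n temp h =>
    rw [digitsLSB]
    simp [h]

lemma digitsLSB_mem (n : Int) (h0 : 0 ≤ n) : ∀ d ∈ digitsLSB n, 0 ≤ d ∧ d < 10 := by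
  fun_induction digitsLSB n with
  | case1 n h ih =>
    intro d hd
    rcases List.mem_cons.mp hd with h1 | h1
    · subst h1
      exact ⟨PySem.Int.mod_nonneg _ (by omega), PySem.Int.mod_lt _ (by omega)⟩
    · exact ih (by
        rw [PySem.Int.floordiv_eq_ediv_of_pos (by omega : (0:Int) < 10)]
        omega) d h1
  | case2 n h =>
    intro d hd
    simp only [List.mem_singleton] at hd
    omega

lemma toDigitsCore_eq (f : Nat) : ∀ (m : Nat) (acc : List Char), m < f →
    Nat.toDigitsCore 10 f m acc = msbChars m ++ acc := by
  induction f with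
  | zero => intro m acc h; omega
  | succ f ih =>
    intro m acc h
    rw [Nat.toDigitsCore]
    by_cases h10 : m / 10 = 0
    · have hm : m < 10 := by omega
      rw [msbChars]
      simp [h10, hm, Nat.mod_eq_of_lt hm]
    · have hm : ¬ m < 10 := by omega
      simp only [h10, if_false]
      rw [ih (m / 10) _ (by omega)]
      conv_rhs => rw [msbChars]
      simp [hm]

lemma digitsLSB_rev (m : Nat) :
    (digitsLSB (m : Int)).reverse.map (fun d => Nat.digitChar d.toNat) = msbChars m := by
  induction m using Nat.strong_induction_on with
  | _ m ih =>
    by_cases h : m < 10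
    · have h' : ¬ (10 : Int) ≤ (m : Int) := by exact_mod_cast Nat.not_le.mpr h
      rw [digitsLSB, msbChars]
      simp [h, h']
    · have h' : (10 : Int) ≤ (m : Int) := by exact_mod_cast Nat.le_of_not_lt h
      rw [digitsLSB, msbChars]
      simp only [h', dite_true, h, dite_false, List.reverse_cons, List.map_append]
      rw [show (10 : Int) = ((10 : Nat) : Int) by norm_num]
      rw [PySem.Int.floordiv_natCast, PySem.Int.mod_natCast]
      rw [ih (m / 10) (by omega)]
      have hmod : ((m : Int) % 10).toNat = m % 10 := by omega
      simp [hmod]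

lemma digitChar_le_iff (a b : Nat) (ha : a < 10) (hb : b < 10) :
    Nat.digitChar a ≤ Nat.digitChar b ↔ a ≤ b := by
  interval_cases a <;> interval_cases b <;> decide

lemma scanA_iff (temp : List Int) :
    ((PySem.List.pyRange 0 (PySem.List.len temp - 1)).all
      (fun i => !decide (PySem.List.pyGetD temp i 0 < PySem.List.pyGetD temp (i + 1) 0)) = true)
    ↔ List.IsChain (fun a b : Int => b ≤ a) temp := by
  rw [List.isChain_iff_getElem]
  rcases temp with _ | ⟨x, xs⟩
  · simp [PySem.List.pyRange, PySem.List.len]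
  · have h1 : PySem.List.len (x :: xs) - 1 = ((xs.length : Nat) : Int) := by
      simp [PySem.List.len_eq]
    rw [h1, PySem.List.pyRange_zero_natCast, List.all_map, List.all_eq_true]
    simp only [List.mem_range, Function.comp, Bool.not_eq_eq_eq_not, Bool.not_true,
      decide_eq_false_iff_not, not_lt]
    constructor
    · intro h i hi
      have hi' : i < xs.length := by simpa using Nat.lt_of_succ_lt_succ hi
      have := h i hi'
      rw [PySem.List.pyGetD_natCast, show ((i : Int) + 1) = ((i + 1 : Nat) : Int) by push_cast; ring,
        PySem.List.pyGetD_natCast] at this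
      rw [List.getD_eq_getElem _ _ (by simp; omega),
        List.getD_eq_getElem _ _ (by simp; omega)] at this
      exact this
    · intro h k hk
      have hk1 : k + 1 < (x :: xs).length := by simpa using Nat.succ_lt_succ hk
      have := h k hk1
      rw [PySem.List.pyGetD_natCast, show ((k : Int) + 1) = ((k + 1 : Nat) : Int) by push_cast; ring,
        PySem.List.pyGetD_natCast]
      rw [List.getD_eq_getElem _ _ (by simp; omega),
        List.getD_eq_getElem _ _ (by simp; omega)]
      exact this

lemma alt_iff (l : List Char) :
    ((l == PySem.List.sorted l (fun c => c)) = true) ↔ List.Pairwise (fun a b : Char => a ≤ b) l := by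
  rw [beq_iff_eq]
  constructor
  · intro h
    rw [h]
    simpa using PySem.List.sorted_pairwise l (fun c => c)
  · intro hp
    exact (PySem.List.sorted_eq_self_of_pairwise l _ hp).symm

-- ===== VERDICT (by name: the statement is the Claim_ definition above) =====
lemma digit_map_pairwise_iff (ds : List Int) (hmem : ∀ d ∈ ds, 0 ≤ d ∧ d < 10) :
    List.Pairwise (fun a b : Char => a ≤ b) ((ds.reverse.map (fun d => Nat.digitChar d.toNat)))
    ↔ List.Pairwise (fun a b : Int => b ≤ a) ds := by
  rw [List.pairwise_map, List.pairwise_reverse]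
  constructor
  · refine List.Pairwise.imp_of_mem ?_
    intro a b ha hb hab
    obtain ⟨ha0, ha9⟩ := hmem a ha
    obtain ⟨hb0, hb9⟩ := hmem b hb
    have := (digitChar_le_iff b.toNat a.toNat (by omega) (by omega)).mp hab
    omega
  · refine List.Pairwise.imp_of_mem ?_
    intro a b ha hb hab
    obtain ⟨ha0, ha9⟩ := hmem a ha
    obtain ⟨hb0, hb9⟩ := hmem b hb
    exact (digitChar_le_iff b.toNat a.toNat (by omega) (by omega)).mpr (by omega)

theorem is_danjo_spec : Claim_equal_is_danjo := by
  intro number _hdom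
  unfold Spec_is_danjo
  by_cases h : number < 10
  · have h' : ¬ (10 : Int) ≤ number := by omega
    rw [is_danjo, is_danjo_alt, loopA_eq, digitsLSB]
    simp [h, h', PySem.List.pyRange, PySem.List.len]
  · have h10 : (10 : Int) ≤ number := by omega
    have h0 : (0 : Int) ≤ number := by omega
    rw [Bool.eq_iff_iff]
    rw [is_danjo, is_danjo_alt]
    simp only [h, if_false]
    rw [loopA_eq, List.nil_append]
    rw [scanA_iff, List.isChain_iff_pairwise]
    rw [PySem.Int.toList_toStr, PySem.Int.toChars]
    have hneg : ¬ number < 0 := by omega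
    rw [if_neg hneg, Nat.toDigits, toDigitsCore_eq (number.toNat + 1) number.toNat [] (by omega),
      List.append_nil]
    rw [alt_iff]
    have hn : number = ((number.toNat : Nat) : Int) := by omega
    rw [← digitsLSB_rev number.toNat, ← hn]
    exact (digit_map_pairwise_iff _ (digitsLSB_mem number h0)).symm
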